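-- pv_equiv track=rewrite | github.com/AdamZhouSE/pythonHomework | Code/CodeRecords/2585/58634/279467.py | canTransform
-- ===== SOURCE A (Python) =====
-- import itertools
--
-- def canTransform(start, end):
--     # For (i, x) and (j, y) in enumerate(start), enumerate(end)
--     # where x != 'X' and y != 'X',
--     # and where if one exhausts early, it's elements are (None, None),...
--     for (i, x), (j, y) in itertools.zip_longest(
--             ((i, x) for i, x in enumerate(start) if x != 'X'),
--             ((j, y) for j, y in enumerate(end) if y != 'X'),
--             fillvalue = (None, None)):
--
--         # If not solid or accessible, return False
--         if x != y or (x == 'L' and i < j) or (x == 'R' and i > j):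
--             return False
--
--     return True
-- ===== SOURCE B (Python) =====
-- def canTransform(start, end):
--     # Staged passes: the non-X characters must agree as sequences, each paired 'L'
--     # may only move left (start index >= end index) and each paired 'R' only right.
--     if [c for c in start if c != 'X'] != [c for c in end if c != 'X']:
--         return False
--     sL = [i for i, c in enumerate(start) if c == 'L']
--     eL = [i for i, c in enumerate(end) if c == 'L']
--     if any(a < b for a, b in zip(sL, eL)):
--         return False
--     sR = [i for i, c in enumerate(start) if c == 'R']
--     eR = [i for i, c in enumerate(end) if c == 'R']
--     return all(a <= b for a, b in zip(sR, eR))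
-- ===== Notes on version B (the rewrite author's own statement) =====
-- stated objective: alternative
-- what changed: Replaces A's single lockstep zip_longest walk over two filtered generators by three independent staged passes: compare the X-stripped character sequences for equality, then separately check that each paired 'L' position did not increase and each paired 'R' position did not decrease.
import Mathlib
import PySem

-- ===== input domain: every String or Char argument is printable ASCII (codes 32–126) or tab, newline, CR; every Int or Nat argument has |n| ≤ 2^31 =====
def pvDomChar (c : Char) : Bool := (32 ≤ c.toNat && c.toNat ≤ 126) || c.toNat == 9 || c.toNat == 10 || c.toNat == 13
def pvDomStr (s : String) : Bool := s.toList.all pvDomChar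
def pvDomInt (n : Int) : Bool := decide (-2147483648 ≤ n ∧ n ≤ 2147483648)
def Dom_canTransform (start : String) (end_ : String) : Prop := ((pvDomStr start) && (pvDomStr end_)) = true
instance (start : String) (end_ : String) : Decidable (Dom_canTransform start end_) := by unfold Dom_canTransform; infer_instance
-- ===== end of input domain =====

-- B replaces A's single lockstep walk over two zip_longest-ed filtered generators by three
-- independent staged passes (X-stripped sequence equality, then the 'L' and 'R' position
-- constraints separately); objective: alternative decomposition, same O(n+m).

-- ===== PORT A =====
-- the generator '((i, x) for i, x in enumerate(s) if x != 'X')': enumerate + filter, exact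
def pvEnumFilter (i : Int) : List Char → List (Int × Char)
  | [] => []
  | c :: s => if c = 'X' then pvEnumFilter (i + 1) s else (i, c) :: pvEnumFilter (i + 1) s

-- A's for-loop over itertools.zip_longest(..., fillvalue=(None,None)): when one side is
-- exhausted the fill (None, None) differs from the other side's (j, y), so Python returns
-- False there — rendered as the mixed [] / _::_ arms.
def pvLoopA : List (Int × Char) → List (Int × Char) → Bool
  | [], [] => true
  | [], _ :: _ => false
  | _ :: _, [] => false
  | (i, x) :: as_, (j, y) :: bs =>
      if x ≠ y ∨ (x = 'L' ∧ i < j) ∨ (x = 'R' ∧ i > j) then false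
      else pvLoopA as_ bs

def canTransform (start : String) (end_ : String) : Bool :=
  pvLoopA (pvEnumFilter 0 start.toList) (pvEnumFilter 0 end_.toList)

-- ===== PORT B =====
-- '[i for i, c in enumerate(s) if c == t]'
def pvPositions (t : Char) (s : List Char) : List Int :=
  ((PySem.List.enumerate s).filter (fun p => p.2 == t)).map (fun p => p.1)

def canTransform_alt (start : String) (end_ : String) : Bool :=
  let s := start.toList
  let e := end_.toList
  if s.filter (fun c => c != 'X') ≠ e.filter (fun c => c != 'X') then false
  else if ((pvPositions 'L' s).zip (pvPositions 'L' e)).any (fun p => p.1 < p.2) then false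
  else ((pvPositions 'R' s).zip (pvPositions 'R' e)).all (fun p => p.1 ≤ p.2)

-- ===== PRECONDITION & SPEC =====
def Spec_canTransform (start : String) (end_ : String) (out : Bool) : Prop := out = canTransform_alt start end_
instance (start : String) (end_ : String) (out : Bool) : Decidable (Spec_canTransform start end_ out) := by unfold Spec_canTransform; infer_instance

-- ===== CLAIM (what is proved, stated in full; the proofs are below) =====
def Claim_equal_canTransform : Prop := ∀ (start : String) (end_ : String), Dom_canTransform start end_ → Spec_canTransform start end_ (canTransform start end_)

-- ===== LEMMAS AND PROOFS =====

-- B's three checks, expressed over the filtered enumerations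
def pvAltList (a b : List (Int × Char)) : Bool :=
  if a.map Prod.snd ≠ b.map Prod.snd then false
  else if (((a.filter (fun p => p.2 == 'L')).map Prod.fst).zip
           ((b.filter (fun p => p.2 == 'L')).map Prod.fst)).any (fun p => p.1 < p.2) then false
  else (((a.filter (fun p => p.2 == 'R')).map Prod.fst).zip
        ((b.filter (fun p => p.2 == 'R')).map Prod.fst)).all (fun p => p.1 ≤ p.2)

theorem pvEnumFilter_eq (i : Int) (s : List Char) :
    pvEnumFilter i s = (PySem.List.enumerate s i).filter (fun p => p.2 != 'X') := by
  induction s generalizing i with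
  | nil => rfl
  | cons c s ih =>
      simp only [pvEnumFilter, PySem.List.enumerate_cons, List.filter_cons]
      by_cases h : c = 'X' <;> simp [h, ih]

theorem pvEnumFilter_snd (i : Int) (s : List Char) :
    (pvEnumFilter i s).map Prod.snd = s.filter (fun c => c != 'X') := by
  induction s generalizing i with
  | nil => rfl
  | cons c s ih =>
      simp only [pvEnumFilter]
      by_cases h : c = 'X' <;> simp [h, ih]

theorem pvPositions_eq (t : Char) (ht : t ≠ 'X') (s : List Char) :
    pvPositions t s = ((pvEnumFilter 0 s).filter (fun p => p.2 == t)).map Prod.fst := by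
  rw [pvEnumFilter_eq, pvPositions, List.filter_filter]
  congr 1
  apply List.filter_congr
  intro p _
  by_cases h : p.2 = t <;> simp [h, ht]

theorem pvLoopA_eq_altList (a b : List (Int × Char)) :
    pvLoopA a b = pvAltList a b := by
  induction a generalizing b with
  | nil =>
      cases b with
      | nil => rfl
      | cons q b => simp [pvLoopA, pvAltList]
  | cons p a ih =>
      obtain ⟨i, x⟩ := p
      cases b with
      | nil => simp [pvLoopA, pvAltList]
      | cons q b =>
          obtain ⟨j, y⟩ := q
          by_cases hxy : x = y
          · subst hxy
            rw [pvLoopA, ih]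
            by_cases hL : x = 'L'
            · subst hL
              simp only [pvAltList, List.map_cons, List.filter_cons]
              by_cases hij : i < j <;>
                by_cases hm : a.map Prod.snd = b.map Prod.snd <;>
                  simp [hij, hm, List.zip_cons_cons]
            · by_cases hR : x = 'R'
              · subst hR
                simp only [pvAltList, List.map_cons, List.filter_cons]
                by_cases hij : i > j <;>
                  by_cases hm : a.map Prod.snd = b.map Prod.snd <;>
                    simp_all [List.zip_cons_cons]
              · simp only [pvAltList, List.map_cons, List.filter_cons]
                by_cases hm : a.map Prod.snd = b.map Prod.snd <;>
                  simp [hL, hR, hm]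
          · simp [pvLoopA, pvAltList, hxy]

theorem canTransform_alt_eq (start end_ : String) :
    canTransform_alt start end_ =
      pvAltList (pvEnumFilter 0 start.toList) (pvEnumFilter 0 end_.toList) := by
  rw [canTransform_alt, pvAltList,
    pvPositions_eq 'L' (by decide), pvPositions_eq 'L' (by decide),
    pvPositions_eq 'R' (by decide), pvPositions_eq 'R' (by decide),
    pvEnumFilter_snd, pvEnumFilter_snd]

-- ===== VERDICT (by name: the statement is the Claim_ definition above) =====
theorem canTransform_spec : Claim_equal_canTransform := by
  intro start end_ _
  unfold Spec_canTransform canTransform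
  rw [canTransform_alt_eq, pvLoopA_eq_altList]
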